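-- pv_equiv track=rewrite | github.com/cde-ksh/SAH | scoring/skill_score.py | score_skills
-- ===== SOURCE A (Python) =====
-- ADVANCED_DOMAINS = [
--     "cloud", "devops", "data", "security"
-- ]
--
-- def score_skills(skill_features):
--
--     total = sum(len(v) for v in skill_features.values())
--
--     advanced = sum(
--         len(skill_features[d])
--         for d in ADVANCED_DOMAINS
--         if d in skill_features
--     )
--
--     base = min(total, 10)
--
--     bonus = min(advanced, 10)
--
--     return min(base + bonus, 20)
-- ===== SOURCE B (Python) =====
-- ADVANCED = frozenset(["cloud", "devops", "data", "security"])
--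
-- def score_skills(skill_features):
--     # Saturating accumulators: each item's length is folded into counters that
--     # are clamped at 10 as we go, with an early exit once both caps are hit.
--     # No final clamps are needed: base,bonus <= 10 at all times, so base+bonus <= 20.
--     base = 0
--     bonus = 0
--     for k, v in skill_features.items():
--         if base == 10 and bonus == 10:
--             break
--         n = len(v)
--         base = min(base + n, 10)
--         if k in ADVANCED:
--             bonus = min(bonus + n, 10)
--     return base + bonus
-- ===== Notes on version B (the rewrite author's own statement) =====
-- stated objective: alternative
-- what changed: B replaces A's full-sum-then-clamp computation (two sums, then min(total,10), min(advanced,10), min(...,20)) by saturating accumulators: one loop folds each value's length into counters already clamped at 10, breaks early once both caps are reached, and returns base+bonus with no final clamps (provably redundant since both counters never exceed 10).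
import Mathlib
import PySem

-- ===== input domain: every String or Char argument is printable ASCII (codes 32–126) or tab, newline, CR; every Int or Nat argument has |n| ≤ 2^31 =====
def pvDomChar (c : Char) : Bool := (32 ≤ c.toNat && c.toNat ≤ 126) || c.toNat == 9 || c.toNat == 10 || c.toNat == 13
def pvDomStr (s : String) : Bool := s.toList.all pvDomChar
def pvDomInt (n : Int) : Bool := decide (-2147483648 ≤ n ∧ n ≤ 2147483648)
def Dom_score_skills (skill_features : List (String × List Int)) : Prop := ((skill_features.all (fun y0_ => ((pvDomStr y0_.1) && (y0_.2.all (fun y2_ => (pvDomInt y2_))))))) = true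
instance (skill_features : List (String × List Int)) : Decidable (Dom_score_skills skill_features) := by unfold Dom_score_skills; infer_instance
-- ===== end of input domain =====

-- B replaces A's full-sums-then-clamp by saturating accumulators (clamped at 10 as they go,
-- early exit once both caps are hit, result base+bonus with no final clamps); objective: alternative.

-- ===== PORT A =====
-- module constant ADVANCED_DOMAINS
def pvADVANCED_DOMAINS : List String := ["cloud", "devops", "data", "security"]

def score_skills (skill_features : List (String × List Int)) : Int :=
  let total := skill_features.foldl (fun s kv => s + (kv.2.length : Int)) 0
  let advanced := pvADVANCED_DOMAINS.foldl (fun s d =>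
    match skill_features.lookup d with   -- 'if d in skill_features: len(skill_features[d])'
    | some v => s + (v.length : Int)
    | none => s) 0
  let base := min total 10
  let bonus := min advanced 10
  min (base + bonus) 20

-- ===== PORT B =====
-- B's frozenset of advanced domains (distinct elements)
def pvADVANCED_SET : List String := ["cloud", "devops", "data", "security"]

-- B's loop with break, as structural recursion over the items: (base, bonus) saturate at 10
def pvGo : List (String × List Int) → Int → Int → Int
  | [], base, bonus => base + bonus
  | (k, v) :: rest, base, bonus =>
    if base = 10 ∧ bonus = 10 then base + bonus   -- break
    else
      let n : Int := v.length
      pvGo rest (min (base + n) 10) (if k ∈ pvADVANCED_SET then min (bonus + n) 10 else bonus)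

def score_skills_alt (skill_features : List (String × List Int)) : Int :=
  pvGo skill_features 0 0

-- ===== PRECONDITION & SPEC =====
-- A receives a Python dict, whose keys are necessarily distinct; association lists with
-- duplicate keys represent no dict input of A, so Pre_ requires pairwise-distinct keys.
def Pre_score_skills (skill_features : List (String × List Int)) : Prop :=
  (skill_features.map Prod.fst).Nodup
instance (skill_features : List (String × List Int)) : Decidable (Pre_score_skills skill_features) := by unfold Pre_score_skills; infer_instance

def pvWitness_score_skills : (List (String × List Int)) := [("cloud", [1, 2]), ("art", [3])]

def Spec_score_skills (skill_features : List (String × List Int)) (out : Int) : Prop := out = score_skills_alt skill_features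
instance (skill_features : List (String × List Int)) (out : Int) : Decidable (Spec_score_skills skill_features out) := by unfold Spec_score_skills; infer_instance

-- ===== CLAIM (what is proved, stated in full; the proofs are below) =====
def Claim_equal_score_skills : Prop := ∀ (skill_features : List (String × List Int)), Dom_score_skills skill_features → Pre_score_skills skill_features → Spec_score_skills skill_features (score_skills skill_features)

-- ===== LEMMAS AND PROOFS =====

-- length (as Int) of the value at key d, 0 if absent
def pvLenOf (L : List (String × List Int)) (d : String) : Int :=
  match L.lookup d with
  | some v => (v.length : Int)
  | none => 0

def pvTotal (L : List (String × List Int)) : Int :=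
  (L.map (fun kv => (kv.2.length : Int))).sum

def pvAdv (L : List (String × List Int)) : Int :=
  (L.map (fun kv => if kv.1 ∈ pvADVANCED_SET then (kv.2.length : Int) else 0)).sum

theorem pvTotal_nonneg (L : List (String × List Int)) : 0 ≤ pvTotal L := by
  induction L with
  | nil => simp [pvTotal]
  | cons kv rest ih =>
    simp only [pvTotal, List.map_cons, List.sum_cons] at *
    positivity

theorem pvAdv_nonneg (L : List (String × List Int)) : 0 ≤ pvAdv L := by
  induction L with
  | nil => simp [pvAdv]
  | cons kv rest ih =>
    simp only [pvAdv, List.map_cons, List.sum_cons] at *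
    by_cases hm : kv.1 ∈ pvADVANCED_SET
    · rw [if_pos hm]; positivity
    · rw [if_neg hm]; simpa using ih

theorem pvLenOf_cons (k : String) (v : List Int) (rest : List (String × List Int)) (d : String) :
    pvLenOf ((k, v) :: rest) d = if d = k then (v.length : Int) else pvLenOf rest d := by
  by_cases h : d = k
  · subst h; simp [pvLenOf, List.lookup]
  · have hb : (d == k) = false := beq_eq_false_iff_ne.mpr h
    simp [pvLenOf, List.lookup, hb, h]

theorem pvLenOf_not_mem (rest : List (String × List Int)) (k : String)
    (h : k ∉ rest.map Prod.fst) : pvLenOf rest k = 0 := by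
  induction rest with
  | nil => rfl
  | cons kv tl ih =>
    obtain ⟨a, b⟩ := kv
    simp only [List.map_cons, List.mem_cons] at h
    push Not at h
    rw [pvLenOf_cons, if_neg h.1, ih h.2]

-- sum over a Nodup list D of an if-eq function
theorem pvSum_ite (D : List String) (hD : D.Nodup) (k : String) (a : Int) (h : String → Int) :
    (D.map (fun d => if d = k then a else h d)).sum
      = (if k ∈ D then a - h k else 0) + (D.map h).sum := by
  induction D with
  | nil => simp
  | cons d D' ih =>
    simp only [List.nodup_cons] at hD
    by_cases hk : d = k
    · subst hk
      simp only [List.map_cons, List.sum_cons, List.mem_cons, true_or, if_true]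
      rw [ih hD.2, if_neg hD.1]
      ring
    · simp only [List.map_cons, List.sum_cons, if_neg hk, List.mem_cons]
      rw [ih hD.2]
      by_cases hm : k ∈ D'
      · rw [if_pos hm, if_pos (Or.inr hm)]; ring
      · rw [if_neg hm, if_neg (by rintro (rfl | h'); exacts [hk rfl, hm h'])]; ring

-- per-domain lookups equal the single filtered pass, for distinct keys
theorem pvAdv_eq (L : List (String × List Int)) (hL : (L.map Prod.fst).Nodup) :
    (pvADVANCED_SET.map (pvLenOf L)).sum = pvAdv L := by
  induction L with
  | nil => decide
  | cons kv rest ih =>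
    obtain ⟨k, v⟩ := kv
    simp only [List.map_cons, List.nodup_cons] at hL
    have hD : (pvADVANCED_SET).Nodup := by decide
    have h1 : pvADVANCED_SET.map (pvLenOf ((k, v) :: rest))
        = pvADVANCED_SET.map (fun d => if d = k then (v.length : Int) else pvLenOf rest d) :=
      List.map_congr_left (fun d _ => pvLenOf_cons k v rest d)
    rw [h1, pvSum_ite _ hD, pvLenOf_not_mem rest k hL.1, ih hL.2]
    simp only [pvAdv, List.map_cons, List.sum_cons]
    by_cases hm : k ∈ pvADVANCED_SET
    · rw [if_pos hm, if_pos hm]; ring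
    · rw [if_neg hm, if_neg hm]

theorem pvA_total (L : List (String × List Int)) (s : Int) :
    L.foldl (fun s kv => s + (kv.2.length : Int)) s = s + pvTotal L := by
  induction L generalizing s with
  | nil => simp [pvTotal]
  | cons kv rest ih =>
    simp only [List.foldl_cons, ih, pvTotal, List.map_cons, List.sum_cons]
    ring

theorem pvA_adv (L : List (String × List Int)) (D : List String) (s : Int) :
    D.foldl (fun s d =>
      match L.lookup d with
      | some v => s + (v.length : Int)
      | none => s) s = s + (D.map (pvLenOf L)).sum := by
  induction D generalizing s with
  | nil => simp
  | cons d D' ih =>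
    simp only [List.foldl_cons, List.map_cons, List.sum_cons]
    rw [ih]
    have : (match L.lookup d with
            | some v => s + (v.length : Int)
            | none => s) = s + pvLenOf L d := by
      unfold pvLenOf
      cases L.lookup d <;> simp
    rw [this]
    ring

theorem pvTotal_cons (k : String) (v : List Int) (rest : List (String × List Int)) :
    pvTotal ((k, v) :: rest) = (v.length : Int) + pvTotal rest := by
  simp [pvTotal]

theorem pvAdv_cons (k : String) (v : List Int) (rest : List (String × List Int)) :
    pvAdv ((k, v) :: rest)
      = (if k ∈ pvADVANCED_SET then (v.length : Int) else 0) + pvAdv rest := by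
  simp only [pvAdv, List.map_cons, List.sum_cons]

-- invariant of B's saturating loop
theorem pvGo_eq (L : List (String × List Int)) (base bonus : Int)
    (hb0 : 0 ≤ base) (hb1 : base ≤ 10) (ho0 : 0 ≤ bonus) (ho1 : bonus ≤ 10) :
    pvGo L base bonus = min (base + pvTotal L) 10 + min (bonus + pvAdv L) 10 := by
  induction L generalizing base bonus with
  | nil =>
    simp only [pvGo, pvTotal, pvAdv, List.map_nil, List.sum_nil]
    omega
  | cons kv rest ih =>
    obtain ⟨k, v⟩ := kv
    have htn : 0 ≤ pvTotal rest := pvTotal_nonneg rest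
    have han : 0 ≤ pvAdv rest := pvAdv_nonneg rest
    have hn : (0 : Int) ≤ (v.length : Int) := by positivity
    simp only [pvGo]
    rw [pvTotal_cons, pvAdv_cons]
    by_cases hbrk : base = 10 ∧ bonus = 10
    · rw [if_pos hbrk]
      obtain ⟨rfl, rfl⟩ := hbrk
      by_cases hm : k ∈ pvADVANCED_SET
      · rw [if_pos hm]; omega
      · rw [if_neg hm]; omega
    · rw [if_neg hbrk]
      by_cases hm : k ∈ pvADVANCED_SET
      · rw [if_pos hm, if_pos hm,
            ih _ _ (by omega) (by omega) (by omega) (by omega)]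
        omega
      · rw [if_neg hm, if_neg hm,
            ih _ _ (by omega) (by omega) ho0 ho1]
        omega

-- ===== VERDICT (by name: the statement is the Claim_ definition above) =====
theorem score_skills_spec : Claim_equal_score_skills := by
  intro L _ hPre
  unfold Spec_score_skills score_skills score_skills_alt
  have hDS : pvADVANCED_DOMAINS = pvADVANCED_SET := rfl
  rw [pvA_total, pvA_adv, hDS, pvAdv_eq L hPre,
      pvGo_eq L 0 0 le_rfl (by norm_num) le_rfl (by norm_num)]
  have h1 := pvTotal_nonneg L
  have h2 := pvAdv_nonneg L
  simp only [zero_add]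
  omega
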